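-- pv_equiv track=rewrite | github.com/Studynium-AI/Studynium.AI-Desktop | regexbasis.py | reg
-- ===== SOURCE A (Python) =====
-- def reg(prompt:str):
--     search = answer = 0
--     lst = prompt.split("\n")
--     for i in range(len(lst)):
--         if ("search" in lst[i].lower())and(":" in lst[i]):
--             search = i
--         elif (("answer" in lst[i].lower())or("response" in lst[i].lower()))and(":" in lst[i]):
--             answer = i
--     search,answer = "\n".join(lst[search:answer+1]),"\n".join(lst[search:])
--     return search,answer
-- ===== SOURCE B (Python) =====
-- def reg(prompt: str):
--     lst = prompt.split("\n")
--
--     def classify(i):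
--         line = lst[i]
--         low = line.lower()
--         if ":" not in line:
--             return (None, None)
--         if "search" in low:
--             return (i, None)
--         if "answer" in low or "response" in low:
--             return (None, i)
--         return (None, None)
--
--     def merge(l, r):
--         return (l[0] if r[0] is None else r[0], l[1] if r[1] is None else r[1])
--
--     def scan(lo, hi):
--         if lo + 1 < hi:
--             mid = (lo + hi) // 2
--             return merge(scan(lo, mid), scan(mid, hi))
--         return classify(lo)
--
--     s, a = scan(0, len(lst))
--     search = 0 if s is None else s
--     answer = 0 if a is None else a
--     return "\n".join(lst[search:answer + 1]), "\n".join(lst[search:])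
-- ===== Notes on version B (the rewrite author's own statement) =====
-- stated objective: alternative
-- what changed: Replaces A's single forward index loop mutating two last-seen variables with a recursive divide-and-conquer: each half-interval is scanned independently for its last search/answer match (classify at leaves, right-biased merge of Optional indices), then the two joined slices are built from the merged result.
import Mathlib
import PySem

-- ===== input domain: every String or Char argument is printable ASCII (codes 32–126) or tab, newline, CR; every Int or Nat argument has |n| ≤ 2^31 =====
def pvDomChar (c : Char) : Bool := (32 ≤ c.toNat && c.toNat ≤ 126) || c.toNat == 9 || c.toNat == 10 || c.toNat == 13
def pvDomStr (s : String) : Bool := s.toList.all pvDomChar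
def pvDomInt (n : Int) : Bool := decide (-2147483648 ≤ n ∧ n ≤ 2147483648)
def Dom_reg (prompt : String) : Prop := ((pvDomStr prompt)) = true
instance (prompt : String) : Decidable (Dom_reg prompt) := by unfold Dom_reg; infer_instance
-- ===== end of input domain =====

-- B replaces A's single forward loop mutating two last-seen indices with a divide-and-conquer
-- over the line-index interval (classify leaves, right-biased merge); objective: alternative.

-- ===== PORT A =====
def reg (prompt : String) : String × String :=
  let lst := ((PySem.Str.split? prompt "\n").getD [])
  let sa := (PySem.List.pyRange 0 (lst.length : Int) 1).foldl
    (fun (st : Int × Int) i =>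
      if PySem.Str.isIn "search" (PySem.Str.lower (PySem.List.pyGetD lst i "")) &&
         PySem.Str.isIn ":" (PySem.List.pyGetD lst i "") then (i, st.2)
      else if (PySem.Str.isIn "answer" (PySem.Str.lower (PySem.List.pyGetD lst i "")) ||
               PySem.Str.isIn "response" (PySem.Str.lower (PySem.List.pyGetD lst i ""))) &&
              PySem.Str.isIn ":" (PySem.List.pyGetD lst i "") then (st.1, i)
      else st) ((0 : Int), (0 : Int))
  (PySem.Str.join "\n" (PySem.List.slice lst (some sa.1) (some (sa.2 + 1))),
   PySem.Str.join "\n" (PySem.List.slice lst (some sa.1) none))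

-- ===== PORT B =====
-- classify(i): which of the two roles line i plays, as a pair of Optional indices
def regClassify (lst : List String) (i : Nat) : Option Int × Option Int :=
  let line := lst.getD i ""
  let low := PySem.Str.lower line
  if !PySem.Str.isIn ":" line then (none, none)
  else if PySem.Str.isIn "search" low then (some (i : Int), none)
  else if PySem.Str.isIn "answer" low || PySem.Str.isIn "response" low then (none, some (i : Int))
  else (none, none)

-- merge(l, r): the right half wins componentwise when it found something
def regMerge (l r : Option Int × Option Int) : Option Int × Option Int :=
  ((match r.1 with | none => l.1 | some v => some v),
   (match r.2 with | none => l.2 | some v => some v))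

-- scan(lo, hi): divide and conquer on the index interval [lo, hi)
-- (the dite guard 'lo + 1 < hi' is Python's 'hi - lo == 1' base test, flipped for totality:
--  it only differs on hi ≤ lo, where the Python never calls scan)
def regScan (lst : List String) (lo hi : Nat) : Option Int × Option Int :=
  if h : lo + 1 < hi then
    let mid := (lo + hi) / 2
    regMerge (regScan lst lo mid) (regScan lst mid hi)
  else regClassify lst lo
termination_by hi - lo
decreasing_by all_goals omega

def reg_alt (prompt : String) : String × String :=
  let lst := ((PySem.Str.split? prompt "\n").getD [])
  let sa := regScan lst 0 lst.length
  let search : Int := sa.1.getD 0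
  let answer : Int := sa.2.getD 0
  (PySem.Str.join "\n" (PySem.List.slice lst (some search) (some (answer + 1))),
   PySem.Str.join "\n" (PySem.List.slice lst (some search) none))

-- ===== PRECONDITION & SPEC =====
def Spec_reg (prompt : String) (out : String × String) : Prop := out = reg_alt prompt
instance (prompt : String) (out : String × String) : Decidable (Spec_reg prompt out) := by unfold Spec_reg; infer_instance

-- ===== CLAIM =====
def Claim_equal_reg : Prop := ∀ (prompt : String), Dom_reg prompt → Spec_reg prompt (reg prompt)

-- ===== LEMMAS AND PROOFS =====

def regIsSearch (line : String) : Bool :=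
  PySem.Str.isIn "search" (PySem.Str.lower line) && PySem.Str.isIn ":" line

def regIsAnswer (line : String) : Bool :=
  (PySem.Str.isIn "answer" (PySem.Str.lower line) || PySem.Str.isIn "response" (PySem.Str.lower line)) &&
  PySem.Str.isIn ":" line && !regIsSearch line

-- A's forward last-update fold computes, componentwise, the last index whose line satisfies
-- the (elif-adjusted) predicate.
lemma regFold (p1 p2 : String → Bool) (l : List (Int × String)) (s a : Int) :
    l.foldl (fun (st : Int × Int) q =>
        if p1 q.2 then (q.1, st.2) else if p2 q.2 then (st.1, q.1) else st) (s, a)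
      = ((match l.reverse.find? (fun q => p1 q.2) with | some q => q.1 | none => s),
         (match l.reverse.find? (fun q => p2 q.2 && !p1 q.2) with | some q => q.1 | none => a)) := by
  induction l using List.reverseRecOn generalizing s a with
  | nil => simp
  | append_singleton l x ih =>
      rw [List.foldl_append, ih, List.reverse_append]
      simp only [List.reverse_singleton, List.singleton_append, List.find?_cons, List.foldl_cons,
        List.foldl_nil]
      by_cases h1 : p1 x.2 <;> by_cases h2 : p2 x.2 <;> simp [h1, h2]

-- classify is the two predicates, componentwise.
lemma regClassify_eq (lst : List String) (i : Nat) :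
    regClassify lst i = ((if regIsSearch (lst.getD i "") then some ((i : Int)) else none),
                         (if regIsAnswer (lst.getD i "") then some ((i : Int)) else none)) := by
  simp only [regClassify, regIsSearch, regIsAnswer]
  rcases Bool.eq_false_or_eq_true (PySem.Str.isIn ":" (lst.getD i "")) with hc | hc <;>
  rcases Bool.eq_false_or_eq_true (PySem.Str.isIn "search" (PySem.Str.lower (lst.getD i ""))) with hs | hs <;>
  rcases Bool.eq_false_or_eq_true (PySem.Str.isIn "answer" (PySem.Str.lower (lst.getD i ""))) with ha | ha <;>
  rcases Bool.eq_false_or_eq_true (PySem.Str.isIn "response" (PySem.Str.lower (lst.getD i ""))) with hr | hr <;>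
    simp only [hc, hs, ha, hr] <;> rfl

-- B's divide-and-conquer computes, componentwise, the last matching index of its interval.
lemma regScan_eq (lst : List String) : ∀ (n lo hi : Nat), hi - lo ≤ n → lo < hi →
    regScan lst lo hi =
      (((List.range' lo (hi - lo)).reverse.find? (fun i => regIsSearch (lst.getD i ""))).map (fun i => (i : Int)),
       ((List.range' lo (hi - lo)).reverse.find? (fun i => regIsAnswer (lst.getD i ""))).map (fun i => (i : Int))) := by
  intro n
  induction n with
  | zero => intro lo hi h1 h2; omega
  | succ n ih =>
    intro lo hi hle hlt
    rw [regScan]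
    by_cases h : lo + 1 < hi
    · rw [dif_pos h]
      show regMerge (regScan lst lo ((lo + hi) / 2)) (regScan lst ((lo + hi) / 2) hi) = _
      have h1 : lo < (lo + hi) / 2 := by omega
      have h2 : (lo + hi) / 2 < hi := by omega
      rw [ih lo ((lo + hi) / 2) (by omega) h1, ih ((lo + hi) / 2) hi (by omega) h2]
      have hsplit : List.range' lo (hi - lo) =
          List.range' lo ((lo + hi) / 2 - lo) ++ List.range' ((lo + hi) / 2) (hi - (lo + hi) / 2) := by
        have h3 : hi - lo = ((lo + hi) / 2 - lo) + (hi - (lo + hi) / 2) := by omega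
        rw [h3, ← List.range'_append]
        have h5 : lo + 1 * ((lo + hi) / 2 - lo) = (lo + hi) / 2 := by omega
        rw [h5]
      rw [hsplit, List.reverse_append, List.find?_append, List.find?_append]
      cases hr1 : (List.range' ((lo + hi) / 2) (hi - (lo + hi) / 2)).reverse.find?
          (fun i => regIsSearch (lst.getD i "")) <;>
      cases hr2 : (List.range' ((lo + hi) / 2) (hi - (lo + hi) / 2)).reverse.find?
          (fun i => regIsAnswer (lst.getD i "")) <;>
        simp [regMerge]
    · rw [dif_neg h]
      have hhi : hi = lo + 1 := by omega
      subst hhi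
      rw [regClassify_eq]
      cases hS : regIsSearch (lst.getD lo "") <;> cases hA : regIsAnswer (lst.getD lo "") <;>
        simp [hS, hA, -List.getD_eq_getElem?_getD]

-- ===== VERDICT =====
lemma regMatchMap (s : Nat → String) (o : Option Nat) :
    (match o.map (fun (k : Nat) => ((k : Int), s k)) with | some q => q.1 | none => (0 : Int))
      = (o.map (fun i => (i : Int))).getD 0 := by
  cases o <;> rfl

theorem reg_spec : Claim_equal_reg := by
  intro prompt _
  unfold Spec_reg reg reg_alt
  set lst := ((PySem.Str.split? prompt "\n").getD []) with hlst
  have he : PySem.List.enumerate lst 0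
      = (PySem.List.pyRange 0 ((lst.length : Int)) 1).map
          (fun j => (j, PySem.List.pyGetD lst j "")) := by
    simpa [PySem.List.len] using PySem.List.enumerate_eq_map_pyRange (xs := lst) (d := "")
  have key := regFold
      (fun line => PySem.Str.isIn "search" (PySem.Str.lower line) && PySem.Str.isIn ":" line)
      (fun line => (PySem.Str.isIn "answer" (PySem.Str.lower line) ||
        PySem.Str.isIn "response" (PySem.Str.lower line)) && PySem.Str.isIn ":" line)
      (PySem.List.enumerate lst 0) 0 0
  rw [he] at key
  rw [List.foldl_map] at key
  simp only [key]
  have hmapped : (PySem.List.pyRange 0 ((lst.length : Int)) 1).map (fun j => (j, PySem.List.pyGetD lst j ""))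
      = (List.range lst.length).map (fun (k : Nat) => ((k : Int), lst.getD k "")) := by
    rw [PySem.List.pyRange_one]
    simp [List.map_map, Function.comp]
  rw [hmapped]
  rw [← List.map_reverse, List.find?_map, List.find?_map]
  cases Nat.eq_zero_or_pos lst.length with
  | inl hz =>
    have hnil : lst = [] := List.eq_nil_of_length_eq_zero hz
    rw [hnil]
    rw [regScan]
    decide
  | inr hpos =>
    rw [regScan_eq lst lst.length 0 lst.length (by omega) hpos]
    simp only [Nat.sub_zero, ← List.range_eq_range']
    simp only [regIsSearch, regIsAnswer, Function.comp_def]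
    rw [regMatchMap, regMatchMap]
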